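-- pv_equiv track=rewrite | github.com/kookmin-sw/capstone-2025-36 | FR-1/src/parsers/table_parser.py | _convert_matrix_to_dict
-- ===== SOURCE A (Python) =====
-- from typing import List, Dict, Tuple
--
-- def _convert_matrix_to_dict(matrix: List[List]) -> Dict:
--     """
--     2차원 배열을 Dict로 변환하는 함수
--         만약 첫번째 행에서 중복되는 값이 있는 경우 두번째 행을 이용하여 Primary Key를 생성함
--         두번째 키와 조합해서도 중복이 생기면 뒤에 수를 추가해서 차이를 만듦
--
--     Args:
--         matrix: 2차원 배열로 된 표 데이터
--
--     Returns:
--         result(Dict[List[str]]): 표의 첫번째 행을 Key로 가지는 Dict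
--     """
--     header_row = matrix[0]
--     second_row = matrix[1]
--
--     header_counts = set()
--     has_duplicates = False
--
--     for header in header_row:
--         if header in header_counts:
--             has_duplicates = True
--             break
--         else:
--             header_counts.add(header)
--
--     keys = []
--     seen_keys = set()
--     for i, (header, value) in enumerate(zip(header_row, second_row)):
--         if has_duplicates:
--             base_key = f"{value}_{header}" if value is not None and value != header else header
--             key = base_key
--             if key in seen_keys:
--                 key = f"{base_key}_{i}"
--         else:
--             key = header
--
--         keys.append(key)
--         seen_keys.add(key)
--
--     result = {key: [] for key in keys}
--     start = 1 if not has_duplicates else 2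
--     for row in matrix[start:]:
--         for i, value in enumerate(row):
--             if i < len(keys):
--                 result[keys[i]].append(value)
--
--     return result
-- ===== SOURCE B (Python) =====
-- def _convert_matrix_to_dict(matrix):
--     header_row = matrix[0]
--     second_row = matrix[1]
--     has_duplicates = len(set(header_row)) != len(header_row)
--
--     keys = []
--     seen_keys = set()
--     for i, (header, value) in enumerate(zip(header_row, second_row)):
--         if has_duplicates:
--             base_key = f"{value}_{header}" if value is not None and value != header else header
--             key = base_key if base_key not in seen_keys else f"{base_key}_{i}"
--         else:
--             key = header
--         keys.append(key)
--         seen_keys.add(key)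
--
--     start = 2 if has_duplicates else 1
--     cols = {}
--     for i, key in enumerate(keys):
--         cols.setdefault(key, []).append(i)
--     rows = matrix[start:]
--     return {
--         key: [row[i] for row in rows for i in idxs if i < len(row)]
--         for key, idxs in cols.items()
--     }
-- ===== Notes on version B (the rewrite author's own statement) =====
-- stated objective: alternative
-- what changed: The row-major populate loop (seed every key with [], scan each row and append cell by cell into the dict) is replaced by a column-index map built once from the keys plus a per-key gather comprehension over the rows; duplicate detection uses len(set(header_row)) != len(header_row) instead of a manual scan with early break.
-- outside the precondition, e.g. on _convert_matrix_to_dict([['a', 'b']]): A raises IndexError, B raises IndexError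
import Mathlib
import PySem

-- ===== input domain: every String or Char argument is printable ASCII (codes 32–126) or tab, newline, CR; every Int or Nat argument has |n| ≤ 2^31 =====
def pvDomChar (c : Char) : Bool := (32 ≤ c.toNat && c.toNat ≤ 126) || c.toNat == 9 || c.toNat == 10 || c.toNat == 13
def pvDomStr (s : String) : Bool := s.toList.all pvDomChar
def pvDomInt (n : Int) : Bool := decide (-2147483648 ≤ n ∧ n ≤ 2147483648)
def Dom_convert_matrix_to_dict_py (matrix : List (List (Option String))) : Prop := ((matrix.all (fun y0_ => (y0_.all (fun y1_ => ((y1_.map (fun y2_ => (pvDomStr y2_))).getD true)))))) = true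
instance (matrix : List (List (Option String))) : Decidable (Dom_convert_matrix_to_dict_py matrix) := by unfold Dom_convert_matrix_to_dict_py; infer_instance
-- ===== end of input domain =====

-- B replaces A's row-major populate loop (seed empty lists, scan every row, append per cell) by a
-- column-index map built once from the keys and a per-key gather over the rows; same return value.

-- ===== PORT A =====
-- A-side helper: the header duplicate scan with early break ('for header in header_row: …')
def pvHasDupLoopA : List (Option String) → PySem.Set (Option String) → Bool
  | [], _ => false
  | h :: t, seen =>
    if PySem.Set.contains seen h then true else pvHasDupLoopA t (PySem.Set.add seen h)

-- A-side helper: the key-building loop ('for i, (header, value) in enumerate(zip(…))')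
def pvKeysLoopA : List (Int × (Option String × Option String)) → Bool → List String → PySem.Set String → List String
  | [], _, ks, _ => ks
  | (i, (header, value)) :: rest, hasDup, ks, seen =>
    let key : String :=
      if hasDup then
        -- Pre_ guarantees header is not None, so the f-string pieces are header's own characters
        let base_key := if value.isSome && value != header then value.getD "" ++ "_" ++ header.getD "" else header.getD ""
        if PySem.Set.contains seen base_key then base_key ++ "_" ++ PySem.Int.toStr i else base_key
      else header.getD ""
    pvKeysLoopA rest hasDup (ks ++ [key]) (PySem.Set.add seen key)

def convert_matrix_to_dict_py (matrix : List (List (Option String))) : List (String × List (Option String)) :=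
  -- matrix[0] / matrix[1]: Pre_ guarantees both rows exist (otherwise Python raises IndexError)
  let header_row := (PySem.List.pyGet? matrix 0).getD []
  let second_row := (PySem.List.pyGet? matrix 1).getD []
  let has_duplicates := pvHasDupLoopA header_row PySem.Set.empty
  let keys := pvKeysLoopA (PySem.List.enumerate (header_row.zip second_row)) has_duplicates [] PySem.Set.empty
  -- result = {key: [] for key in keys}
  let result0 : PySem.Dict String (List (Option String)) :=
    keys.foldl (fun d key => d.insert key []) PySem.Dict.empty
  let start : Int := if !has_duplicates then 1 else 2
  -- for row in matrix[start:]: for i, value in enumerate(row): if i < len(keys): result[keys[i]].append(value)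
  -- (keys[i] is always an existing key of result, so Dict.modify is exactly the append)
  let result := (PySem.List.slice matrix (some start) none).foldl (fun d row =>
      (PySem.List.enumerate row).foldl (fun d p =>
        if p.1 < (keys.length : Int) then
          d.modify (PySem.List.pyGetD keys p.1 "") [] (fun l => l ++ [p.2])
        else d) d) result0
  result.items

-- ===== PORT B =====
-- B-side helper: one step of the key-building fold over enumerate(zip(header_row, second_row))
def pvKeyStepB (has_duplicates : Bool) (st : List String × PySem.Set String)
    (p : Int × (Option String × Option String)) : List String × PySem.Set String :=
  let key : String :=
    if has_duplicates then
      let base_key := if p.2.2.isSome && p.2.2 != p.2.1 then p.2.2.getD "" ++ "_" ++ p.2.1.getD "" else p.2.1.getD ""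
      if PySem.Set.contains st.2 base_key then base_key ++ "_" ++ PySem.Int.toStr p.1 else base_key
    else p.2.1.getD ""
  (st.1 ++ [key], PySem.Set.add st.2 key)

def convert_matrix_to_dict_py_alt (matrix : List (List (Option String))) : List (String × List (Option String)) :=
  let header_row := (PySem.List.pyGet? matrix 0).getD []
  let second_row := (PySem.List.pyGet? matrix 1).getD []
  -- has_duplicates = len(set(header_row)) != len(header_row)
  let has_duplicates := PySem.Set.len (PySem.Set.ofList header_row) != (header_row.length : Int)
  let keys := ((PySem.List.enumerate (header_row.zip second_row)).foldl (pvKeyStepB has_duplicates) ([], PySem.Set.empty)).1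
  let start : Int := if has_duplicates then 2 else 1
  -- cols: for i, key in enumerate(keys): cols.setdefault(key, []).append(i)
  let cols : PySem.Dict String (List Int) :=
    (PySem.List.enumerate keys).foldl (fun d p => d.modify p.2 [] (fun l => l ++ [p.1])) PySem.Dict.empty
  let rows := PySem.List.slice matrix (some start) none
  -- {key: [row[i] for row in rows for i in idxs if i < len(row)] for key, idxs in cols.items()}
  cols.items.map (fun kv =>
    (kv.1, rows.flatMap (fun row =>
      (kv.2.filter (fun i => decide (i < (row.length : Int)))).map (fun i => PySem.List.pyGetD row i none))))

-- ===== PRECONDITION & SPEC =====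
-- Pre_ excludes matrices with fewer than two rows (Python raises IndexError on matrix[1]) and
-- matrices where a header cell that is zipped with the second row is None: there both Pythons
-- return the same dict, but its keys are not all strings, outside the declared return type.
def Pre_convert_matrix_to_dict_py (matrix : List (List (Option String))) : Prop :=
  2 ≤ matrix.length ∧ ∀ h ∈ (matrix.getD 0 []).take (matrix.getD 1 []).length, h.isSome

instance (matrix : List (List (Option String))) : Decidable (Pre_convert_matrix_to_dict_py matrix) := by
  unfold Pre_convert_matrix_to_dict_py; infer_instance

def pvWitness_convert_matrix_to_dict_py : List (List (Option String)) :=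
  [[some "a", some "b"], [some "1", some "2"], [some "x", some "y"]]

def Spec_convert_matrix_to_dict_py (matrix : List (List (Option String))) (out : List (String × List (Option String))) : Prop := out = convert_matrix_to_dict_py_alt matrix
instance (matrix : List (List (Option String))) (out : List (String × List (Option String))) : Decidable (Spec_convert_matrix_to_dict_py matrix out) := by unfold Spec_convert_matrix_to_dict_py; infer_instance

-- ===== CLAIM (what is proved, stated in full; the proofs are below) =====
def Claim_equal_convert_matrix_to_dict_py : Prop := ∀ (matrix : List (List (Option String))), Dom_convert_matrix_to_dict_py matrix → Pre_convert_matrix_to_dict_py matrix → Spec_convert_matrix_to_dict_py matrix (convert_matrix_to_dict_py matrix)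

-- ===== LEMMAS AND PROOFS =====

lemma pv_contains_iff {α : Type} [BEq α] [LawfulBEq α] (s : PySem.Set α) (x : α) :
    PySem.Set.contains s x = true ↔ x ∈ s := by
  simp [PySem.Set.contains]

-- the two key-building loops compute the same key list
lemma pv_keysLoop_eq (hd : Bool) :
    ∀ (l : List (Int × (Option String × Option String))) (ks : List String) (seen : PySem.Set String),
      pvKeysLoopA l hd ks seen = (l.foldl (pvKeyStepB hd) (ks, seen)).1 := by
  intro l
  induction l with
  | nil => intro ks seen; simp [pvKeysLoopA]
  | cons p t ih =>
    intro ks seen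
    obtain ⟨i, header, value⟩ := p
    simp only [pvKeysLoopA, List.foldl_cons, pvKeyStepB]
    exact ih _ _

-- A's early-break duplicate scan returns false exactly on a duplicate-free, seen-disjoint list
lemma pv_hasDupLoopA_false_iff :
    ∀ (l : List (Option String)) (seen : PySem.Set (Option String)),
      pvHasDupLoopA l seen = false ↔ (l.Nodup ∧ ∀ x ∈ l, x ∉ seen) := by
  intro l
  induction l with
  | nil => intro seen; simp [pvHasDupLoopA]
  | cons h t ih =>
    intro seen
    by_cases hc : h ∈ seen
    · have hct : PySem.Set.contains seen h = true := (pv_contains_iff seen h).mpr hc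
      simp only [pvHasDupLoopA, hct, if_true]
      simp only [Bool.true_eq_false, false_iff]
      rintro ⟨_, hall⟩
      exact hall h (by simp) hc
    · have hcf : ¬ PySem.Set.contains seen h = true := fun hct => hc ((pv_contains_iff seen h).mp hct)
      simp only [pvHasDupLoopA]
      rw [if_neg hcf, ih]
      constructor
      · rintro ⟨hnd, hall⟩
        have hht : h ∉ t := fun hm => hall h hm ((PySem.Set.mem_add seen h h).mpr (Or.inr rfl))
        refine ⟨List.nodup_cons.mpr ⟨hht, hnd⟩, ?_⟩
        intro x hx
        rcases List.mem_cons.mp hx with rfl | hx'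
        · exact hc
        · intro hxs
          exact hall x hx' ((PySem.Set.mem_add seen h x).mpr (Or.inl hxs))
      · rintro ⟨hnd, hall⟩
        rcases List.nodup_cons.mp hnd with ⟨hht, hnd'⟩
        refine ⟨hnd', fun x hx hxadd => ?_⟩
        rcases (PySem.Set.mem_add seen h x).mp hxadd with hxs | rfl
        · exact hall x (List.mem_cons_of_mem _ hx) hxs
        · exact hht hx

-- Set.ofList keeps a sublist of its argument
lemma pv_foldl_add_sublist {α : Type} [BEq α] :
    ∀ (l : List α) (s : PySem.Set α), ∃ t, l.foldl PySem.Set.add s = s ++ t ∧ t.Sublist l := by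
  intro l
  induction l with
  | nil => intro s; exact ⟨[], by simp, List.Sublist.refl _⟩
  | cons h t ih =>
    intro s
    simp only [List.foldl_cons]
    by_cases hc : PySem.Set.contains s h = true
    · rw [show PySem.Set.add s h = s from by unfold PySem.Set.add; rw [if_pos hc]]
      obtain ⟨u, hu, hsub⟩ := ih s
      exact ⟨u, hu, hsub.cons h⟩
    · rw [show PySem.Set.add s h = s ++ [h] from by unfold PySem.Set.add; rw [if_neg hc]]
      obtain ⟨u, hu, hsub⟩ := ih (s ++ [h])
      exact ⟨h :: u, by simpa using hu, hsub.cons₂ h⟩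

lemma pv_foldl_add_of_nodup {α : Type} [BEq α] [LawfulBEq α] :
    ∀ (l : List α) (s : PySem.Set α), l.Nodup → (∀ x ∈ l, x ∉ s) → l.foldl PySem.Set.add s = s ++ l := by
  intro l
  induction l with
  | nil => intro s _ _; simp
  | cons h t ih =>
    intro s hnd hall
    rcases List.nodup_cons.mp hnd with ⟨hht, hnd'⟩
    have hc : ¬ PySem.Set.contains s h = true := fun hct => hall h (by simp) ((pv_contains_iff s h).mp hct)
    simp only [List.foldl_cons]
    rw [show PySem.Set.add s h = s ++ [h] from by unfold PySem.Set.add; rw [if_neg hc]]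
    rw [ih (s ++ [h]) hnd']
    · simp
    · intro x hx
      simp only [List.mem_append, List.mem_singleton]
      rintro (hxs | rfl)
      · exact hall x (by simp [hx]) hxs
      · exact hht hx

lemma pv_ofList_length_eq_iff {α : Type} [BEq α] [LawfulBEq α] (l : List α) :
    (PySem.Set.ofList l).length = l.length ↔ l.Nodup := by
  constructor
  · intro hlen
    obtain ⟨t, ht, hsub⟩ := pv_foldl_add_sublist l []
    have h1 : PySem.Set.ofList l = t := by simpa [PySem.Set.ofList, PySem.Set.empty] using ht
    have h2 : t = l := hsub.eq_of_length (by rw [← h1]; exact hlen)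
    have h3 := PySem.Set.nodup_ofList l
    rw [h1, h2] at h3
    exact h3
  · intro hnd
    have h1 := pv_foldl_add_of_nodup l [] hnd (by simp)
    simp only [PySem.Set.ofList, PySem.Set.empty]
    rw [h1]
    simp

-- the two duplicate detections agree
lemma pv_hasDup_eq (l : List (Option String)) :
    pvHasDupLoopA l PySem.Set.empty = (PySem.Set.len (PySem.Set.ofList l) != (l.length : Int)) := by
  by_cases hnd : l.Nodup
  · have h1 : pvHasDupLoopA l PySem.Set.empty = false :=
      (pv_hasDupLoopA_false_iff l PySem.Set.empty).mpr
        ⟨hnd, by intro x _ hx; simp [PySem.Set.empty] at hx⟩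
    have h2 : (PySem.Set.ofList l).length = l.length := (pv_ofList_length_eq_iff l).mpr hnd
    rw [h1]
    symm
    rw [bne_eq_false_iff_eq]
    simp only [PySem.Set.len]
    exact_mod_cast h2
  · have h1 : pvHasDupLoopA l PySem.Set.empty = true := by
      rcases Bool.eq_false_or_eq_true (pvHasDupLoopA l PySem.Set.empty) with ht | hf
      · exact ht
      · exact absurd ((pv_hasDupLoopA_false_iff l PySem.Set.empty).mp hf).1 hnd
    have h2 : (PySem.Set.ofList l).length ≠ l.length := fun h => hnd ((pv_ofList_length_eq_iff l).mp h)
    rw [h1]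
    symm
    rw [bne_iff_ne]
    simp only [PySem.Set.len]
    intro hcast
    exact h2 (by exact_mod_cast hcast)

-- Python indexing on a cons cell
lemma pv_pyGetD_zero {α : Type} (x : α) (xs : List α) (d : α) :
    PySem.List.pyGetD (x :: xs) 0 d = x := by
  simp [PySem.List.pyGetD, PySem.List.pyGet?, PySem.List.pyIdx?]

lemma pv_pyGetD_cons_pos {α : Type} (x : α) (xs : List α) (i : Int) (d : α) (h : 1 ≤ i) :
    PySem.List.pyGetD (x :: xs) i d = PySem.List.pyGetD xs (i - 1) d := by
  rw [PySem.List.pyGetD_of_nonneg _ _ (by omega), PySem.List.pyGetD_of_nonneg _ _ (by omega)]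
  rw [show i.toNat = (i - 1).toNat + 1 from by omega, List.getD_cons_succ]

lemma pv_pyGetD_mem {α : Type} (xs : List α) (i : Int) (d : α) (h0 : 0 ≤ i) (hl : i < (xs.length : Int)) :
    PySem.List.pyGetD xs i d ∈ xs := by
  rw [PySem.List.pyGetD_eq_getElem xs d h0 hl]
  exact List.getElem_mem _

lemma pv_fst_ge_of_mem_enumerate {α : Type} (xs : List α) (s : Int) (p : Int × α)
    (hp : p ∈ PySem.List.enumerate xs s) : s ≤ p.1 := by
  rw [PySem.List.mem_enumerate_iff] at hp
  obtain ⟨k, hk, rfl⟩ := hp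
  simp

-- THE CORE: per row, the values A appends for key k while scanning the row left to right are
-- exactly the values B gathers for k by walking k's column indices
lemma pv_core (k : String) :
    ∀ (keys : List String) (r : List (Option String)) (s : Nat),
      ((((PySem.List.enumerate r (s : Int)).filter (fun p => decide (p.1 < (s : Int) + (keys.length : Int)))).map
          (fun p => (PySem.List.pyGetD keys (p.1 - (s : Int)) "", p.2))).filter (fun q => q.1 == k)).map (fun q => q.2)
      = ((((PySem.List.enumerate keys (s : Int)).filter (fun p => p.2 == k)).map (fun p => p.1)).filter
          (fun i => decide (i < (s : Int) + (r.length : Int)))).map (fun i => PySem.List.pyGetD r (i - (s : Int)) none) := by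
  intro keys
  induction keys with
  | nil =>
    intro r s
    have h1 : (PySem.List.enumerate r (s : Int)).filter (fun p => decide (p.1 < (s : Int) + (([] : List String).length : Int))) = [] :=
      List.filter_eq_nil_iff.mpr (fun p hp => by
        have := pv_fst_ge_of_mem_enumerate r s p hp
        simp
        omega)
    rw [h1]
    simp
  | cons key keys ih =>
    intro r s
    cases r with
    | nil =>
      have h1 : ((((PySem.List.enumerate (key :: keys) (s : Int)).filter (fun p => p.2 == k)).map (fun p => p.1)).filter
          (fun i => decide (i < (s : Int) + (([] : List (Option String)).length : Int)))) = [] :=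
        List.filter_eq_nil_iff.mpr (fun i hi => by
          obtain ⟨p, hp, rfl⟩ := List.mem_map.mp hi
          have := pv_fst_ge_of_mem_enumerate _ (s : Int) p (List.mem_filter.mp hp).1
          simp
          omega)
      rw [h1]
      simp
    | cons v r =>
      have ihr := ih r (s + 1)
      have hcast : (((s + 1 : Nat)) : Int) = (s : Int) + 1 := by push_cast; ring
      simp only [hcast] at ihr
      rw [PySem.List.enumerate_cons v r (s : Int), PySem.List.enumerate_cons key keys (s : Int)]
      simp only [List.filter_cons, List.length_cons, Nat.cast_add, Nat.cast_one,
        decide_eq_true_eq]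
      rw [if_pos (show (s : Int) < (s : Int) + ((keys.length : Int) + 1) by omega)]
      simp only [List.map_cons]
      rw [show ((s : Int) - (s : Int)) = 0 from sub_self _]
      rw [pv_pyGetD_zero]
      -- reshape the tails to the (s+1) forms of the induction hypothesis
      have htailL : (List.map (fun p => (PySem.List.pyGetD (key :: keys) (p.1 - (s : Int)) "", p.2))
            ((PySem.List.enumerate r ((s : Int) + 1)).filter (fun p => decide (p.1 < (s : Int) + ((keys.length : Int) + 1)))))
          = (List.map (fun p => (PySem.List.pyGetD keys (p.1 - ((s : Int) + 1)) "", p.2))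
            ((PySem.List.enumerate r ((s : Int) + 1)).filter (fun p => decide (p.1 < ((s : Int) + 1) + (keys.length : Int))))) := by
        rw [List.filter_congr (fun (p : Int × Option String) _ =>
          (show (decide (p.1 < (s : Int) + ((keys.length : Int) + 1)) = decide (p.1 < ((s : Int) + 1) + (keys.length : Int))) from
            decide_eq_decide.mpr (by omega)))]
        apply List.map_congr_left
        intro p hp
        have hge := pv_fst_ge_of_mem_enumerate r ((s : Int) + 1) p (List.mem_filter.mp hp).1
        rw [pv_pyGetD_cons_pos _ _ _ _ (by omega)]
        rw [show p.1 - (s : Int) - 1 = p.1 - ((s : Int) + 1) from by ring]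
      have htailR : (List.map (fun i => PySem.List.pyGetD (v :: r) (i - (s : Int)) none)
            ((((PySem.List.enumerate keys ((s : Int) + 1)).filter (fun p => p.2 == k)).map (fun p => p.1)).filter
              (fun i => decide (i < (s : Int) + ((r.length : Int) + 1)))))
          = (List.map (fun i => PySem.List.pyGetD r (i - ((s : Int) + 1)) none)
            ((((PySem.List.enumerate keys ((s : Int) + 1)).filter (fun p => p.2 == k)).map (fun p => p.1)).filter
              (fun i => decide (i < ((s : Int) + 1) + (r.length : Int))))) := by
        rw [List.filter_congr (fun (i : Int) _ =>
          (show (decide (i < (s : Int) + ((r.length : Int) + 1)) = decide (i < ((s : Int) + 1) + (r.length : Int))) from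
            decide_eq_decide.mpr (by omega)))]
        apply List.map_congr_left
        intro i hi
        rcases List.mem_filter.mp hi with ⟨hi', _⟩
        obtain ⟨p, hp, rfl⟩ := List.mem_map.mp hi'
        have hge := pv_fst_ge_of_mem_enumerate keys ((s : Int) + 1) p (List.mem_filter.mp hp).1
        rw [pv_pyGetD_cons_pos _ _ _ _ (by omega)]
        rw [show p.1 - (s : Int) - 1 = p.1 - ((s : Int) + 1) from by ring]
      by_cases hk : key = k
      · subst hk
        simp only [beq_self_eq_true, if_pos]
        rw [List.filter_cons]
        rw [if_pos (show ((key, v).1 == key) = true from by simp)]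
        simp only [List.map_cons]
        rw [List.filter_cons]
        rw [if_pos (show decide ((s : Int) < (s : Int) + ((r.length : Int) + 1)) = true from by
          simp only [decide_eq_true_eq]; omega)]
        simp only [List.map_cons]
        rw [show ((s : Int) - (s : Int)) = 0 from sub_self _, pv_pyGetD_zero]
        congr 1
        rw [htailL, htailR]
        exact ihr
      · have hkf : (key == k) = false := by simpa using hk
        rw [List.filter_cons]
        rw [if_neg (show ¬ (((key, v).1 == k) = true) from by simp [hkf])]
        rw [if_neg (show ¬ ((((s : Int), key).2 == k) = true) from by simp [hkf])]
        rw [htailL, htailR]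
        exact ihr

-- A's guarded inner fold is a plain modify-fold over the filtered, key-annotated row
lemma pv_inner_eq (keys : List String) :
    ∀ (l : List (Int × Option String)) (d : PySem.Dict String (List (Option String))),
      l.foldl (fun d p =>
          if p.1 < (keys.length : Int) then
            d.modify (PySem.List.pyGetD keys p.1 "") [] (fun l => l ++ [p.2])
          else d) d
      = ((l.filter (fun p => decide (p.1 < (keys.length : Int)))).map
          (fun p => (PySem.List.pyGetD keys p.1 "", p.2))).foldl
          (fun d q => d.modify q.1 [] (fun l => l ++ [q.2])) d := by
  intro l
  induction l with
  | nil => intro d; simp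
  | cons p t ih =>
    intro d
    by_cases hp : p.1 < (keys.length : Int) <;>
      simp [hp, ih]

-- getD over the seeding fold {key: [] for key in keys} is always []
lemma pv_init_getD (k : String) :
    ∀ (keys : List String) (d : PySem.Dict String (List (Option String))),
      d.getD k [] = [] → (keys.foldl (fun d key => d.insert key []) d).getD k [] = [] := by
  intro keys
  induction keys with
  | nil => intro d hd; simpa using hd
  | cons h t ih =>
    intro d hd
    simp only [List.foldl_cons]
    apply ih
    by_cases hk : k = h
    · subst hk; rw [PySem.Dict.getD_insert_self]
    · rw [PySem.Dict.getD_insert_of_ne _ _ _ hk]; exact hd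

-- items of a dict with duplicate-free keys, written through getD
lemma pv_items_eq {ν : Type} (dflt : ν) :
    ∀ (l : List (String × ν)), (l.map Prod.fst).Nodup →
      l = (l.map Prod.fst).map (fun k => (k, (PySem.Dict.mk l).getD k dflt)) := by
  intro l
  induction l with
  | nil => intro _; simp
  | cons p rest ih =>
    intro hnd
    obtain ⟨k, v⟩ := p
    simp only [List.map_cons] at hnd
    rcases List.nodup_cons.mp hnd with ⟨hknot, hnd'⟩
    have hhead : (PySem.Dict.mk ((k, v) :: rest)).getD k dflt = v := by
      simp [PySem.Dict.getD, PySem.Dict.get?_mk_cons]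
    simp only [List.map_cons]
    congr 1
    · rw [hhead]
    · calc rest = (rest.map Prod.fst).map (fun k' => (k', (PySem.Dict.mk rest).getD k' dflt)) := ih hnd'
        _ = (rest.map Prod.fst).map (fun k' => (k', (PySem.Dict.mk ((k, v) :: rest)).getD k' dflt)) := by
            apply List.map_congr_left
            intro k' hk'
            have hne : (k == k') = false := by
              have hkk : ¬ k = k' := fun h => hknot (h ▸ hk')
              simpa using hkk
            simp [PySem.Dict.getD, PySem.Dict.get?_mk_cons, hne]

lemma pv_dict_items_eq {ν : Type} (d : PySem.Dict String ν) (dflt : ν) (h : d.keys.Nodup) :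
    d.items = d.keys.map (fun k => (k, d.getD k dflt)) := by
  obtain ⟨l⟩ := d
  exact pv_items_eq dflt l h

lemma pv_set_update_of_subset {α : Type} [BEq α] [LawfulBEq α] :
    ∀ (l : List α) (s : PySem.Set α), (∀ x ∈ l, x ∈ s) → PySem.Set.update s l = s := by
  intro l
  induction l with
  | nil => intro s _; rfl
  | cons h t ih =>
    intro s hall
    show (h :: t).foldl PySem.Set.add s = s
    simp only [List.foldl_cons]
    rw [show PySem.Set.add s h = s from by
      unfold PySem.Set.add; rw [if_pos ((pv_contains_iff s h).mpr (hall h (by simp)))]]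
    exact ih s (fun x hx => hall x (by simp [hx]))

-- keys of {key: [] for key in keys}
lemma pv_init_keys (keys : List String) :
    (keys.foldl (fun d key => d.insert key []) (PySem.Dict.empty : PySem.Dict String (List (Option String)))).keys
      = PySem.Set.ofList keys := by
  rw [PySem.Dict.keys_foldl_insert keys (fun _ _ => []) PySem.Dict.empty]
  rfl

-- the populate loop never adds a key
lemma pv_populate_keys (keys : List String) :
    ∀ (rows : List (List (Option String))) (d : PySem.Dict String (List (Option String))),
      (∀ x ∈ keys, x ∈ d.keys) →
      (rows.foldl (fun d row =>
          (PySem.List.enumerate row).foldl (fun d p =>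
            if p.1 < (keys.length : Int) then
              d.modify (PySem.List.pyGetD keys p.1 "") [] (fun l => l ++ [p.2])
            else d) d) d).keys = d.keys := by
  intro rows
  induction rows with
  | nil => intro d _; rfl
  | cons row rows ih =>
    intro d hsub
    simp only [List.foldl_cons]
    have hinner : ((PySem.List.enumerate row).foldl (fun d p =>
        if p.1 < (keys.length : Int) then
          d.modify (PySem.List.pyGetD keys p.1 "") [] (fun l => l ++ [p.2])
        else d) d).keys = d.keys := by
      rw [pv_inner_eq]
      rw [PySem.Dict.keys_foldl_modify_key _ (fun q : String × Option String => q.1) [] (fun _ q => fun l => l ++ [q.2]) d]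
      apply pv_set_update_of_subset
      intro x hx
      simp only [List.map_map] at hx
      obtain ⟨p, hp, rfl⟩ := List.mem_map.mp hx
      rcases List.mem_filter.mp hp with ⟨henum, hdec⟩
      have h0 : (0 : Int) ≤ p.1 := by simpa using pv_fst_ge_of_mem_enumerate row 0 p henum
      have hlt : p.1 < (keys.length : Int) := of_decide_eq_true hdec
      exact hsub _ (pv_pyGetD_mem keys p.1 "" h0 hlt)
    rw [ih _ (fun x hx => by rw [hinner]; exact hsub x hx)]
    exact hinner

-- the populate loop, read back through getD
lemma pv_populate_getD (keys : List String) (k : String) :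
    ∀ (rows : List (List (Option String))) (d : PySem.Dict String (List (Option String))),
      (rows.foldl (fun d row =>
          (PySem.List.enumerate row).foldl (fun d p =>
            if p.1 < (keys.length : Int) then
              d.modify (PySem.List.pyGetD keys p.1 "") [] (fun l => l ++ [p.2])
            else d) d) d).getD k []
      = d.getD k [] ++ rows.flatMap (fun row =>
          ((((PySem.List.enumerate row).filter (fun p => decide (p.1 < (keys.length : Int)))).map
            (fun p => (PySem.List.pyGetD keys p.1 "", p.2))).filter (fun q => q.1 == k)).map (fun q => q.2)) := by
  intro rows
  induction rows with
  | nil => intro d; simp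
  | cons row rows ih =>
    intro d
    simp only [List.foldl_cons, List.flatMap_cons]
    rw [ih]
    rw [pv_inner_eq keys (PySem.List.enumerate row) d]
    rw [PySem.Dict.getD_foldl_modify_append]
    rw [List.append_assoc]

-- B's column dict, read back through getD and keys
lemma pv_cols_getD (keys : List String) (k : String) :
    ((PySem.List.enumerate keys).foldl (fun d p => d.modify p.2 [] (fun l => l ++ [p.1]))
        (PySem.Dict.empty : PySem.Dict String (List Int))).getD k []
    = ((PySem.List.enumerate keys).filter (fun p => p.2 == k)).map (fun p => p.1) := by
  rw [show (PySem.List.enumerate keys).foldl (fun d p => d.modify p.2 [] (fun l => l ++ [p.1]))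
        (PySem.Dict.empty : PySem.Dict String (List Int))
      = ((PySem.List.enumerate keys).map (fun p => (p.2, p.1))).foldl
          (fun d q => d.modify q.1 [] (fun l => l ++ [q.2])) PySem.Dict.empty from by
    rw [List.foldl_map]]
  rw [PySem.Dict.getD_foldl_modify_append]
  rw [List.filter_map, List.map_map]
  rfl

lemma pv_cols_keys (keys : List String) :
    ((PySem.List.enumerate keys).foldl (fun d p => d.modify p.2 [] (fun l => l ++ [p.1]))
        (PySem.Dict.empty : PySem.Dict String (List Int))).keys = PySem.Set.ofList keys := by
  rw [PySem.Dict.keys_foldl_modify_key _ (fun p : Int × String => p.2) [] (fun _ p => fun l => l ++ [p.1]) PySem.Dict.empty]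
  rw [PySem.List.map_snd_enumerate]
  rfl

-- the heart of the claim: A's populated dict and B's column-gathered dict have the same items
lemma pv_main (keys : List String) (rows : List (List (Option String))) :
    (rows.foldl (fun d row =>
        (PySem.List.enumerate row).foldl (fun d p =>
          if p.1 < (keys.length : Int) then
            d.modify (PySem.List.pyGetD keys p.1 "") [] (fun l => l ++ [p.2])
          else d) d)
      (keys.foldl (fun d key => d.insert key []) PySem.Dict.empty)).items
    = ((PySem.List.enumerate keys).foldl (fun d p => d.modify p.2 [] (fun l => l ++ [p.1])) PySem.Dict.empty).items.map
        (fun kv => (kv.1, rows.flatMap (fun row =>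
          (kv.2.filter (fun i => decide (i < (row.length : Int)))).map (fun i => PySem.List.pyGetD row i none)))) := by
  have hnd := PySem.Set.nodup_ofList keys
  have hAkeys : (rows.foldl (fun d row =>
        (PySem.List.enumerate row).foldl (fun d p =>
          if p.1 < (keys.length : Int) then
            d.modify (PySem.List.pyGetD keys p.1 "") [] (fun l => l ++ [p.2])
          else d) d)
      (keys.foldl (fun d key => d.insert key []) PySem.Dict.empty)).keys = PySem.Set.ofList keys := by
    rw [pv_populate_keys keys rows _
      (fun x hx => by rw [pv_init_keys]; exact (PySem.Set.mem_ofList keys x).mpr hx)]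
    exact pv_init_keys keys
  have hCkeys := pv_cols_keys keys
  rw [pv_dict_items_eq _ ([] : List (Option String)) (by rw [hAkeys]; exact hnd)]
  rw [pv_dict_items_eq _ ([] : List Int) (by rw [hCkeys]; exact hnd)]
  rw [hAkeys, hCkeys, List.map_map]
  apply List.map_congr_left
  intro k hk
  simp only [Function.comp]
  rw [pv_cols_getD]
  rw [pv_populate_getD keys k rows _]
  rw [pv_init_getD k keys PySem.Dict.empty rfl]
  rw [List.nil_append]
  have hrow : ∀ row : List (Option String),
      ((((PySem.List.enumerate row).filter (fun p => decide (p.1 < (keys.length : Int)))).map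
        (fun p => (PySem.List.pyGetD keys p.1 "", p.2))).filter (fun q => q.1 == k)).map (fun q => q.2)
      = ((((PySem.List.enumerate keys).filter (fun p => p.2 == k)).map (fun p => p.1)).filter
          (fun i => decide (i < (row.length : Int)))).map (fun i => PySem.List.pyGetD row i none) := by
    intro row
    have h := pv_core k keys row 0
    simp only [Nat.cast_zero, sub_zero, zero_add] at h
    exact h
  simp only [hrow]

-- the two ports agree on every input
lemma pv_ports_eq (matrix : List (List (Option String))) :
    convert_matrix_to_dict_py matrix = convert_matrix_to_dict_py_alt matrix := by
  simp only [convert_matrix_to_dict_py, convert_matrix_to_dict_py_alt]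
  simp only [pv_hasDup_eq, pv_keysLoop_eq]
  have hstart : ∀ b : Bool, (if (!b) = true then (1 : Int) else 2) = if b = true then 2 else 1 := by decide
  simp only [hstart]
  exact pv_main _ _

-- ===== VERDICT (by name: the statement is the Claim_ definition above) =====
theorem convert_matrix_to_dict_py_spec : Claim_equal_convert_matrix_to_dict_py := by
  intro matrix _ _
  unfold Spec_convert_matrix_to_dict_py
  exact pv_ports_eq matrix
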